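-- pv_equiv track=rewrite | github.com/sirber/playground | python/count_repetition/count_repetition.py | count_repetition
-- ===== SOURCE A (Python) =====
-- def count_repetition(source):
--   count = 0
--   map = {}
--
--   for number in source:
--     value = map.get(number)
--
--     if value is not None:
--       map[number] = value + 1
--     else:
--       map[number] = 0
--
--   for key, value in map.items():
--     count += value
--
--   return count
-- ===== SOURCE B (Python) =====
-- def count_repetition(source):
--   # simpler: total elements minus distinct elements, in one pass
--   total = 0
--   seen = set()
--   for number in source:
--     total += 1
--     seen.add(number)
--   return total - len(seen)
-- ===== Notes on version B (the rewrite author's own statement) =====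
-- stated objective: simpler
-- what changed: Replaces the dict of per-value extra-occurrence counts plus a second summation loop over its items with a single pass that counts elements and collects distinct values in a set, returning total minus distinct.
import Mathlib
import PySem

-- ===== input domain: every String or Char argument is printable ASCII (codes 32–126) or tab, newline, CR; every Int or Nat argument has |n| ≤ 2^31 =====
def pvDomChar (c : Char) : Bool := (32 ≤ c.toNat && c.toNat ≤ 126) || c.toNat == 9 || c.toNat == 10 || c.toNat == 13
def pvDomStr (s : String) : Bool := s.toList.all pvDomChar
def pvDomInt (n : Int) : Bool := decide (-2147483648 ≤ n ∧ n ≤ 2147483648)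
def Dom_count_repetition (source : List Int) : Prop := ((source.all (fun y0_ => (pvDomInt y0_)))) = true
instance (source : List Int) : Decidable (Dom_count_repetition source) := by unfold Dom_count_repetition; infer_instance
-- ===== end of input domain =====

-- ===== PORT A =====
-- B is one pass: count the elements and collect the distinct values, return total - distinct.
-- literal port of A: build a dict value -> (occurrences - 1), then sum its values
def count_repetition (source : List Int) : Int :=
  let m : PySem.Dict Int Int := source.foldl
    (fun m number =>
      match m.get? number with
      | some v => m.insert number (v + 1)
      | none   => m.insert number 0)
    PySem.Dict.empty
  m.items.foldl (fun count kv => count + kv.2) 0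

-- ===== PORT B =====
-- literal port of B: one pass counting elements and collecting distinct values in a set
def count_repetition_alt (source : List Int) : Int :=
  let p : Int × PySem.Set Int := source.foldl
    (fun p number => (p.1 + 1, PySem.Set.add p.2 number)) (0, PySem.Set.empty)
  p.1 - PySem.Set.len p.2

-- ===== PRECONDITION & SPEC =====
def Spec_count_repetition (source : List Int) (out : Int) : Prop := out = count_repetition_alt source
instance (source : List Int) (out : Int) : Decidable (Spec_count_repetition source out) := by unfold Spec_count_repetition; infer_instance

-- ===== CLAIM (what is proved, stated in full; the proofs are below) =====
def Claim_equal_count_repetition : Prop := ∀ (source : List Int), Dom_count_repetition source → Spec_count_repetition source (count_repetition source)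

-- ===== LEMMAS AND PROOFS =====

-- ===== VERDICT (by name: the statement is the Claim_ definition above) =====
-- A's loop body is exactly insert x (getD x (-1) + 1)
theorem stepA_eq (d : PySem.Dict Int Int) (x : Int) :
    (match d.get? x with
     | some v => d.insert x (v + 1)
     | none   => d.insert x 0) = d.insert x (d.getD x (-1) + 1) := by
  rcases h : d.get? x with _ | v <;>
    simp [PySem.Dict.getD_eq_get?_getD, h]

-- the counting invariant of A's first loop, with A's default -1
theorem getD_loopA (l : List Int) (d : PySem.Dict Int Int) (v : Int) :
    (l.foldl (fun d x => d.insert x (d.getD x (-1) + 1)) d).getD v (-1)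
      = d.getD v (-1) + l.count v := by
  induction l generalizing d with
  | nil => simp
  | cons x l ih =>
    simp only [List.foldl_cons, ih, List.count_cons]
    by_cases hvx : v = x
    · subst hvx
      rw [PySem.Dict.getD_insert_self]
      simp only [beq_self_eq_true, if_true]
      push_cast
      ring
    · rw [PySem.Dict.getD_insert]
      have hxv : ¬ x = v := fun h => hvx h.symm
      simp [hvx, hxv]

theorem sum_count_distinct (source : List Int) :
    ((PySem.Set.ofList source).map (fun k => (source.count k : Int))).sum
      = (source.length : Int) := by
  have hperm : (PySem.Set.ofList source).Perm source.dedup := by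
    rw [List.perm_ext_iff_of_nodup (PySem.Set.nodup_ofList source) source.nodup_dedup]
    intro a; simp [PySem.Set.mem_ofList, List.mem_dedup]
  have := (hperm.map (fun k => (source.count k : Int))).sum_eq
  rw [this]
  have hnat := List.sum_map_count_dedup_eq_length source
  have h2 := congrArg (fun n : Nat => (n : Int)) hnat
  push_cast at h2
  simpa using h2

theorem foldl_count_ones (l : List Int) (a : Int) :
    List.foldl (fun a (_ : Int) => a + 1) a l = a + l.length := by
  induction l generalizing a with
  | nil => simp
  | cons x l ih => simp [ih]; ring

theorem count_repetition_spec : Claim_equal_count_repetition := by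
  intro source _
  unfold Spec_count_repetition count_repetition count_repetition_alt
  -- B side: the pair fold splits into a length count and Set.ofList
  rw [PySem.List.foldl_prod_mk (fun a (_ : Int) => a + 1) PySem.Set.add source 0 PySem.Set.empty]
  rw [show (PySem.Set.empty : PySem.Set Int) = [] from rfl,
      ← PySem.Set.ofList_eq_foldl, foldl_count_ones]
  -- A side: rewrite the loop body, then sum the dict's values
  have hstep : (fun (m : PySem.Dict Int Int) (number : Int) =>
      match m.get? number with
      | some v => m.insert number (v + 1)
      | none   => m.insert number 0)
    = fun m x => m.insert x (m.getD x (-1) + 1) := by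
    funext m x; exact stepA_eq m x
  rw [hstep]
  set m := source.foldl (fun (d : PySem.Dict Int Int) x => d.insert x (d.getD x (-1) + 1))
    PySem.Dict.empty with hm
  have hkeys : m.keys = PySem.Set.ofList source := by
    rw [hm, PySem.Dict.keys_foldl_insert, PySem.Dict.keys_empty, PySem.Set.update_nil_left]
  have hnd : m.keys.Nodup := by rw [hkeys]; exact PySem.Set.nodup_ofList source
  have hitems : m.items.foldl (fun count kv => count + kv.2) 0 = m.values.sum := by
    rw [PySem.List.foldl_add m.items (fun kv => kv.2) 0]
    simp [PySem.Dict.values]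
  rw [hitems, PySem.Dict.values_eq_map_keys m hnd (-1), hkeys]
  have hmap : (PySem.Set.ofList source).map (fun k => m.getD k (-1))
      = (PySem.Set.ofList source).map (fun k => -1 + (source.count k : Int)) := by
    refine List.map_congr_left (fun k _ => ?_)
    rw [hm, getD_loopA source PySem.Dict.empty k, PySem.Dict.getD_empty]
  rw [hmap, PySem.List.sum_map_add_int, PySem.List.sum_map_const_int, sum_count_distinct]
  simp [PySem.Set.len]
  ring
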